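-- pv_equiv track=rewrite | github.com/erobic/occam-nets-v1 | utils/evonorm.py | get_num_groups
-- ===== SOURCE A (Python) =====
-- def get_num_groups(num_channels, max_size=32):
--     i = 0
--     grp_size = 1
--     while True:
--         _grp_size = 2 ** i
--         i += 1
--         if num_channels % _grp_size == 0:
--             grp_size = _grp_size
--         else:
--             break
--
--     return min(grp_size, max_size)
-- ===== SOURCE B (Python) =====
-- def get_num_groups(num_channels, max_size=32):
--     # Lowest set bit of a nonzero integer (two's complement identity)
--     # equals the largest power of 2 dividing it.
--     return min(num_channels & -num_channels, max_size)
-- ===== Notes on version B (the rewrite author's own statement) =====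
-- stated objective: simpler
-- what changed: B replaces A's trial loop over growing powers 2**i with the loop-free two's-complement identity n & -n (lowest set bit = largest power-of-2 divisor), then caps with min.
-- outside the precondition, e.g. on get_num_groups(0, 32): A does not finish within the time limit, B returns 0
import Mathlib
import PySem

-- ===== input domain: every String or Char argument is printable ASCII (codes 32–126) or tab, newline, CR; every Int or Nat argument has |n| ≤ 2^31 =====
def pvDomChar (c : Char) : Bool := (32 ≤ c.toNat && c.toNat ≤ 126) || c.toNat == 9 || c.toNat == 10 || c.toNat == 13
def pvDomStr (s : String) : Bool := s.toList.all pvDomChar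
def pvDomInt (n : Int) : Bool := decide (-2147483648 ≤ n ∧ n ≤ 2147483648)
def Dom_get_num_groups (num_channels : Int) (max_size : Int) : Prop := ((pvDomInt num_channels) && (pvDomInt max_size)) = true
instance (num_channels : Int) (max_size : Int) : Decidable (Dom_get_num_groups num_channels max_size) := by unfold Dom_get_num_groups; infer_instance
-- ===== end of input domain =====

-- B replaces A's trial loop over growing powers 2**i with the loop-free two's-complement
-- identity n & -n (lowest set bit of a nonzero integer = its largest power-of-2 divisor).

-- ===== PORT A =====
-- A's 'while True' loop, fuel-guarded to make it total: for num_channels ≠ 0 the loop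
-- in Python stops at the first i with 2^i ∤ num_channels, which happens within
-- natAbs num_channels + 1 iterations, so the fuel is never exhausted on Pre_.
def gngLoopA (num_channels : Int) : Nat → Nat → Int → Int
  | 0, _, grp_size => grp_size
  | fuel+1, i, grp_size =>
    let g : Int := 2 ^ i
    if PySem.Int.mod num_channels g = 0 then gngLoopA num_channels fuel (i+1) g
    else grp_size

def get_num_groups (num_channels : Int) (max_size : Int) : Int :=
  min (gngLoopA num_channels (num_channels.natAbs + 1) 0 1) max_size

-- ===== PORT B =====
-- Python's '&' on ints is two's-complement bitwise and = Int.land (exact for all ints).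
def get_num_groups_alt (num_channels : Int) (max_size : Int) : Int :=
  min (Int.land num_channels (-num_channels)) max_size

-- ===== PRECONDITION & SPEC =====
-- Pre_ excludes only num_channels = 0, on which A loops forever (0 % anything == 0).
def Pre_get_num_groups (num_channels : Int) (_max_size : Int) : Prop := num_channels ≠ 0
instance (num_channels : Int) (max_size : Int) : Decidable (Pre_get_num_groups num_channels max_size) := by unfold Pre_get_num_groups; infer_instance
def pvWitness_get_num_groups : Int × Int := (12, 32)
def Spec_get_num_groups (num_channels : Int) (max_size : Int) (out : Int) : Prop := out = get_num_groups_alt num_channels max_size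
instance (num_channels : Int) (max_size : Int) (out : Int) : Decidable (Spec_get_num_groups num_channels max_size out) := by unfold Spec_get_num_groups; infer_instance

-- ===== CLAIM (what is proved, stated in full; the proofs are below) =====
def Claim_equal_get_num_groups : Prop := ∀ (num_channels : Int) (max_size : Int), Dom_get_num_groups num_channels max_size → Pre_get_num_groups num_channels max_size → Spec_get_num_groups num_channels max_size (get_num_groups num_channels max_size)

-- ===== LEMMAS AND PROOFS =====

-- k = the 2-adic valuation of n; A's loop computes 2^k and B's n & -n equals 2^k.

theorem gng_dvd_int {n : Int} (hn : n ≠ 0) :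
    (2 : Int) ^ padicValNat 2 n.natAbs ∣ n := by
  have h : (2 : Nat) ^ padicValNat 2 n.natAbs ∣ n.natAbs := pow_padicValNat_dvd
  have h2 : ((2 : Nat) ^ padicValNat 2 n.natAbs : Int) ∣ (n.natAbs : Int) :=
    Int.natCast_dvd_natCast.mpr h
  have h3 : (n.natAbs : Int) ∣ n := Int.natAbs_dvd.mpr dvd_rfl
  calc (2 : Int) ^ padicValNat 2 n.natAbs
      = ((2 : Nat) ^ padicValNat 2 n.natAbs : Int) := by push_cast; ring
    _ ∣ n := dvd_trans h2 h3

theorem gng_not_dvd_int {n : Int} (hn : n ≠ 0) :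
    ¬ (2 : Int) ^ (padicValNat 2 n.natAbs + 1) ∣ n := by
  intro h
  have hna : n.natAbs ≠ 0 := by simpa using hn
  have h1 : ((2 : Nat) ^ (padicValNat 2 n.natAbs + 1) : Int) ∣ n := by
    calc ((2 : Nat) ^ (padicValNat 2 n.natAbs + 1) : Int)
        = (2 : Int) ^ (padicValNat 2 n.natAbs + 1) := by push_cast; ring
      _ ∣ n := h
  have h2 : (2 : Nat) ^ (padicValNat 2 n.natAbs + 1) ∣ n.natAbs :=
    Int.natCast_dvd_natCast.mp (Int.dvd_natAbs.mpr h1)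
  exact pow_succ_padicValNat_not_dvd hna h2

theorem gng_k_le {n : Int} (hn : n ≠ 0) : padicValNat 2 n.natAbs + 1 ≤ n.natAbs := by
  have hna : n.natAbs ≠ 0 := by simpa using hn
  have h : (2 : Nat) ^ padicValNat 2 n.natAbs ∣ n.natAbs := pow_padicValNat_dvd
  have h2 : (2 : Nat) ^ padicValNat 2 n.natAbs ≤ n.natAbs :=
    Nat.le_of_dvd (Nat.pos_of_ne_zero hna) h
  have h3 : padicValNat 2 n.natAbs < 2 ^ padicValNat 2 n.natAbs := Nat.lt_two_pow_self
  omega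

-- A's loop: while i ≤ k every test succeeds, at i = k + 1 it fails and returns grp = 2^k.
theorem gngLoopA_done {n : Int} {k : Nat}
    (hk2 : ¬ (2 : Int) ^ (k + 1) ∣ n) (fuel : Nat) (grp : Int) :
    gngLoopA n (fuel + 1) (k + 1) grp = grp := by
  have : ¬ PySem.Int.mod n ((2 : Int) ^ (k + 1)) = 0 := by
    rw [PySem.Int.mod_eq_zero_iff_dvd]; exact hk2
  simp only [gngLoopA]
  rw [if_neg this]

theorem gngLoopA_run {n : Int} {k : Nat}
    (hk1 : (2 : Int) ^ k ∣ n) (hk2 : ¬ (2 : Int) ^ (k + 1) ∣ n) :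
    ∀ (fuel i : Nat) (grp : Int), i ≤ k → k - i + 2 ≤ fuel →
      gngLoopA n fuel i grp = 2 ^ k := by
  intro fuel
  induction fuel with
  | zero => intro i grp _ hf; omega
  | succ f ih =>
    intro i grp hik hf
    have hdvd : (2 : Int) ^ i ∣ n := dvd_trans (pow_dvd_pow 2 hik) hk1
    have hmod : PySem.Int.mod n ((2 : Int) ^ i) = 0 :=
      (PySem.Int.mod_eq_zero_iff_dvd n _).mpr hdvd
    simp only [gngLoopA, hmod, if_pos]
    rcases Nat.lt_or_ge i k with hlt | hge
    · exact ih (i + 1) (2 ^ i) (by omega) (by omega)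
    · have hik' : i = k := by omega
      subst hik'
      obtain ⟨f', rfl⟩ : ∃ f', f = f' + 1 := ⟨f - 1, by omega⟩
      exact gngLoopA_done hk2 f' (2 ^ i)

-- The bit identity on Nat: for a ≠ 0, a AND NOT (a-1) keeps exactly the lowest set bit.
theorem gng_ldiff_pred {a : Nat} (_ha : a ≠ 0)
    (hk1 : (2 : Nat) ^ padicValNat 2 a ∣ a)
    (hk2 : ¬ (2 : Nat) ^ (padicValNat 2 a + 1) ∣ a) :
    Nat.ldiff a (a - 1) = 2 ^ padicValNat 2 a := by
  set k := padicValNat 2 a with hk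
  obtain ⟨m, hm⟩ := hk1
  have hmodd : m % 2 = 1 := by
    rcases Nat.mod_two_eq_zero_or_one m with h | h
    · exfalso
      obtain ⟨c, hc⟩ := (Nat.dvd_iff_mod_eq_zero).mpr h
      exact hk2 ⟨c, by rw [hm, hc, pow_succ]; ring⟩
    · exact h
  have hmpos : 0 < m := by omega
  apply Nat.eq_of_testBit_eq
  intro i
  rw [Nat.testBit_ldiff, Nat.testBit_two_pow]
  rcases Nat.lt_trichotomy i k with hik | hik | hik
  · -- i < k : bit i of a is 0
    have h1 : a.testBit i = false := by
      rw [Nat.testBit_eq_decide_div_mod_eq]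
      have : a / 2 ^ i = 2 ^ (k - i) * m := by
        rw [hm]
        have : (2:Nat) ^ k = 2 ^ i * 2 ^ (k - i) := by
          rw [← pow_add]; congr 1; omega
        rw [this, mul_assoc, Nat.mul_div_cancel_left _ (Nat.pos_of_ne_zero (by positivity))]
      rw [this]
      have : 2 ^ (k - i) * m % 2 = 0 := by
        have : (2:Nat) ^ (k - i) * m = 2 * (2 ^ (k - i - 1) * m) := by
          have h2 : (2:Nat) ^ (k - i) = 2 * 2 ^ (k - i - 1) := by
            rw [← pow_succ']; congr 1; omega
          rw [h2]; ring
        omega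
      simp [this]
    have hki : ¬ k = i := by omega
    simp [h1, hki]
  · -- i = k : bit k of a is 1, bit k of a-1 is 0
    have hp : 0 < (2:Nat) ^ k := by positivity
    have h1 : a.testBit k = true := by
      rw [Nat.testBit_eq_decide_div_mod_eq, hm, Nat.mul_div_cancel_left _ hp]
      simp [hmodd]
    have h2 : (a - 1).testBit k = false := by
      rw [Nat.testBit_eq_decide_div_mod_eq]
      have hA : 2 ^ k ≤ 2 ^ k * m := Nat.le_mul_of_pos_right _ hmpos
      have h3 : 2 ^ k * (m - 1) = 2 ^ k * m - 2 ^ k := by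
        rw [Nat.mul_sub, mul_one]
      have hsub : a - 1 = (2 ^ k - 1) + 2 ^ k * (m - 1) := by omega
      rw [hsub, Nat.add_mul_div_left _ _ hp, Nat.div_eq_of_lt (by omega)]
      have hme : (m - 1) % 2 = 0 := by omega
      simp [hme]
    rw [hik, h1, h2]
    simp
  · -- i > k : a mod 2^i ≠ 0, so bit i of a-1 equals bit i of a
    have hnd : ¬ (2:Nat) ^ i ∣ a := fun h =>
      hk2 (dvd_trans (pow_dvd_pow 2 (by omega)) h)
    have hp : 0 < (2:Nat) ^ i := by positivity
    have hr : a % 2 ^ i ≠ 0 := fun h => hnd ((Nat.dvd_iff_mod_eq_zero).mpr h)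
    have hd : (a - 1) / 2 ^ i = a / 2 ^ i := by
      have ha' : a = 2 ^ i * (a / 2 ^ i) + a % 2 ^ i := (Nat.div_add_mod a (2 ^ i)).symm
      have : a - 1 = (a % 2 ^ i - 1) + 2 ^ i * (a / 2 ^ i) := by omega
      rw [this, Nat.add_mul_div_left _ _ hp,
        Nat.div_eq_of_lt (by have := Nat.mod_lt a hp; omega)]
      omega
    have heq : (a - 1).testBit i = a.testBit i := by
      rw [Nat.testBit_eq_decide_div_mod_eq, Nat.testBit_eq_decide_div_mod_eq, hd]
    rw [heq]
    have hki : ¬ k = i := by omega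
    simp [hki]

-- B's closed form: n & -n = 2^(the 2-adic valuation of |n|) for n ≠ 0.
theorem gng_land_neg {n : Int} (hn : n ≠ 0) :
    Int.land n (-n) = (2 : Int) ^ padicValNat 2 n.natAbs := by
  have key : ∀ a : Nat, a + 1 ≠ 0 → Nat.ldiff (a + 1) a = 2 ^ padicValNat 2 (a + 1) := by
    intro a ha
    have h1 : (2 : Nat) ^ padicValNat 2 (a + 1) ∣ (a + 1) := pow_padicValNat_dvd
    have h2 : ¬ (2 : Nat) ^ (padicValNat 2 (a + 1) + 1) ∣ (a + 1) := fun h =>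
      pow_succ_padicValNat_not_dvd ha h
    have := gng_ldiff_pred ha h1 h2
    simpa using this
  match n, hn with
  | Int.ofNat (a + 1), _ =>
    show Int.land (Int.ofNat (a + 1)) (-(Int.ofNat (a + 1))) = _
    have hneg : -(Int.ofNat (a + 1)) = Int.negSucc a := rfl
    rw [hneg]
    show ((Nat.ldiff (a + 1) a : Nat) : Int) = _
    rw [key a (by omega)]
    have : (Int.ofNat (a + 1)).natAbs = a + 1 := rfl
    rw [this]; push_cast; ring
  | Int.negSucc a, _ =>
    show Int.land (Int.negSucc a) (-(Int.negSucc a)) = _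
    have hneg : -(Int.negSucc a) = Int.ofNat (a + 1) := rfl
    rw [hneg]
    show ((Nat.ldiff (a + 1) a : Nat) : Int) = _
    rw [key a (by omega)]
    have : (Int.negSucc a).natAbs = a + 1 := rfl
    rw [this]; push_cast; ring

-- ===== VERDICT (by name: the statement is the Claim_ definition above) =====
theorem get_num_groups_spec : Claim_equal_get_num_groups := by
  intro n m _ hn
  unfold Spec_get_num_groups get_num_groups get_num_groups_alt
  have hk1 := gng_dvd_int hn
  have hk2 := gng_not_dvd_int hn
  have hle := gng_k_le hn
  rw [gngLoopA_run hk1 hk2 (n.natAbs + 1) 0 1 (by omega) (by omega), gng_land_neg hn]
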